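-- pv_equiv track=rewrite | github.com/Reasonofmoon/streamlit-lv-test | extract_questions.py | extract_section_from_question
-- ===== SOURCE A (Python) =====
-- def extract_section_from_question(question_text):
--     """문제 내용으로 섹션 추출"""
--     question_lower = question_text.lower()
--
--     if any(word in question_lower for word in ['read', 'passage', 'text', 'story']):
--         return 'Reading'
--     elif any(word in question_lower for word in ['vocabulary', 'word', 'meaning', 'synonym']):
--         return 'Vocabulary'
--     elif any(word in question_lower for word in ['conversation', 'dialogue', 'talk']):
--         return 'Conversation'
--     elif any(word in question_lower for word in ['grammar', 'verb', 'tense', 'sentence']):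
--         return 'Grammar'
--     elif any(word in question_lower for word in ['write', 'writing']):
--         return 'Writing'
--     else:
--         return 'General'
-- ===== SOURCE B (Python) =====
-- SECTIONS = ['Reading', 'Vocabulary', 'Conversation', 'Grammar', 'Writing']
--
-- KEYWORD_PRIORITY = {
--     'read': 0, 'passage': 0, 'text': 0, 'story': 0,
--     'vocabulary': 1, 'word': 1, 'meaning': 1, 'synonym': 1,
--     'conversation': 2, 'dialogue': 2, 'talk': 2,
--     'grammar': 3, 'verb': 3, 'tense': 3, 'sentence': 3,
--     'write': 4, 'writing': 4,
-- }
--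
--
-- def extract_section_from_question(question_text):
--     """Single pass over a flat keyword->priority map, keeping the minimum
--     matched priority; the section is looked up from that priority at the end."""
--     question_lower = question_text.lower()
--     best = None
--     for keyword, priority in KEYWORD_PRIORITY.items():
--         if keyword in question_lower and (best is None or priority < best):
--             best = priority
--     return 'General' if best is None else SECTIONS[best]
-- ===== Notes on version B (the rewrite author's own statement) =====
-- stated objective: alternative
-- what changed: Replaced the first-match if/elif cascade over section keyword groups by a single accumulator pass over a flat keyword->priority map that computes the minimum matched priority and looks the section up from it at the end (no early return, no per-section grouping in the scan).
import Mathlib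
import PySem

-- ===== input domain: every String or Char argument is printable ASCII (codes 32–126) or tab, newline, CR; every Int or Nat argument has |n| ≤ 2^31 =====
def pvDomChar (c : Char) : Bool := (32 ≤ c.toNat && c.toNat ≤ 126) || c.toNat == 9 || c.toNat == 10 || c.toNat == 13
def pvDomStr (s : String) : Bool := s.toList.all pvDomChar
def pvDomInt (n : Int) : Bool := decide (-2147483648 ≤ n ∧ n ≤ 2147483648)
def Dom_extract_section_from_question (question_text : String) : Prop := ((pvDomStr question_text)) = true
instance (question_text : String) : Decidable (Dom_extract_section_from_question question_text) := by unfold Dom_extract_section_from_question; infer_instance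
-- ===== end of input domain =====

-- B replaces A's if/elif cascade with one minimum-accumulator pass over a flat keyword->priority map, then a section lookup (alternative decomposition, same cost).


-- ===== PORT A =====
def extract_section_from_question (question_text : String) : String :=
  let question_lower := PySem.Str.lower question_text
  if ["read", "passage", "text", "story"].any (fun word => PySem.Str.isIn word question_lower) then
    "Reading"
  else if ["vocabulary", "word", "meaning", "synonym"].any (fun word => PySem.Str.isIn word question_lower) then
    "Vocabulary"
  else if ["conversation", "dialogue", "talk"].any (fun word => PySem.Str.isIn word question_lower) then
    "Conversation"
  else if ["grammar", "verb", "tense", "sentence"].any (fun word => PySem.Str.isIn word question_lower) then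
    "Grammar"
  else if ["write", "writing"].any (fun word => PySem.Str.isIn word question_lower) then
    "Writing"
  else
    "General"

-- ===== PORT B =====
def SECTIONS : List String := ["Reading", "Vocabulary", "Conversation", "Grammar", "Writing"]

-- flat keyword -> priority map (Python dict in insertion order)
def KEYWORD_PRIORITY : List (String × Int) :=
  [("read", 0), ("passage", 0), ("text", 0), ("story", 0),
   ("vocabulary", 1), ("word", 1), ("meaning", 1), ("synonym", 1),
   ("conversation", 2), ("dialogue", 2), ("talk", 2),
   ("grammar", 3), ("verb", 3), ("tense", 3), ("sentence", 3),
   ("write", 4), ("writing", 4)]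

-- body of B's loop: keep the smaller matched priority
def pvStep (question_lower : String) (best : Option Int) (kp : String × Int) : Option Int :=
  if PySem.Str.isIn kp.1 question_lower &&
     (match best with | none => true | some b => decide (kp.2 < b)) then
    some kp.2
  else best

def extract_section_from_question_alt (question_text : String) : String :=
  let question_lower := PySem.Str.lower question_text
  let best : Option Int := KEYWORD_PRIORITY.foldl (pvStep question_lower) none
  match best with
  | none => "General"
  | some p => (PySem.List.pyGet? SECTIONS p).getD "General"  -- p ∈ {0..4}, lookup never fails

-- ===== PRECONDITION & SPEC =====
def Spec_extract_section_from_question (question_text : String) (out : String) : Prop := out = extract_section_from_question_alt question_text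
instance (question_text : String) (out : String) : Decidable (Spec_extract_section_from_question question_text out) := by unfold Spec_extract_section_from_question; infer_instance

-- ===== CLAIM (what is proved, stated in full; the proofs are below) =====
def Claim_equal_extract_section_from_question : Prop := ∀ (question_text : String), Dom_extract_section_from_question question_text → Spec_extract_section_from_question question_text (extract_section_from_question question_text)

-- ===== LEMMAS AND PROOFS =====

-- once the accumulator holds k and every remaining priority is ≥ k, the fold is frozen
theorem pvStep_foldl_frozen (ql : String) (k : Int) :
    ∀ l : List (String × Int), (∀ kp ∈ l, k ≤ kp.2) →
      List.foldl (pvStep ql) (some k) l = some k := by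
  intro l
  induction l with
  | nil => intro _; rfl
  | cons kp rest ih =>
      intro h
      have hk : ¬ kp.2 < k := not_lt.mpr (h kp (List.mem_cons_self ..))
      simp only [List.foldl, pvStep, hk, decide_false, Bool.and_false]
      exact ih (fun x hx => h x (List.mem_cons_of_mem _ hx))

-- on a priority-sorted keyword list the minimum-accumulator fold returns the
-- priority of the first matching keyword
theorem pvStep_foldl_eq_find (ql : String) :
    ∀ l : List (String × Int), List.Pairwise (fun a b => a.2 ≤ b.2) l →
      List.foldl (pvStep ql) none l
        = (List.find? (fun kp => PySem.Str.isIn kp.1 ql) l).map Prod.snd := by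
  intro l
  induction l with
  | nil => intro _; rfl
  | cons kp rest ih =>
      intro h
      rcases List.pairwise_cons.mp h with ⟨hhead, htail⟩
      cases hm : PySem.Str.isIn kp.1 ql with
      | true =>
          simp only [List.foldl, pvStep, hm, if_true, List.find?, Bool.and_true]
          exact pvStep_foldl_frozen ql kp.2 rest (fun x hx => hhead x hx)
      | false =>
          simp only [List.foldl, pvStep, hm, Bool.false_and, List.find?]
          exact ih htail

-- ===== VERDICT (by name: the statement is the Claim_ definition above) =====
theorem extract_section_from_question_spec : Claim_equal_extract_section_from_question := by
  intro q _
  simp only [Spec_extract_section_from_question, extract_section_from_question,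
    extract_section_from_question_alt,
    pvStep_foldl_eq_find (PySem.Str.lower q) KEYWORD_PRIORITY (by unfold KEYWORD_PRIORITY; decide)]
  unfold KEYWORD_PRIORITY SECTIONS
  cases h1 : PySem.Str.isIn "read" (PySem.Str.lower q)
  case true =>
    simp only [List.any, List.find?, h1]
    norm_num [PySem.List.pyGet?, PySem.List.pyIdx?]
    try decide
  case false =>
    cases h2 : PySem.Str.isIn "passage" (PySem.Str.lower q)
    case true =>
      simp only [List.any, List.find?, h1, h2]
      norm_num [PySem.List.pyGet?, PySem.List.pyIdx?]
      try decide
    case false =>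
      cases h3 : PySem.Str.isIn "text" (PySem.Str.lower q)
      case true =>
        simp only [List.any, List.find?, h1, h2, h3]
        norm_num [PySem.List.pyGet?, PySem.List.pyIdx?]
        try decide
      case false =>
        cases h4 : PySem.Str.isIn "story" (PySem.Str.lower q)
        case true =>
          simp only [List.any, List.find?, h1, h2, h3, h4]
          norm_num [PySem.List.pyGet?, PySem.List.pyIdx?]
          try decide
        case false =>
          cases h5 : PySem.Str.isIn "vocabulary" (PySem.Str.lower q)
          case true =>
            simp only [List.any, List.find?, h1, h2, h3, h4, h5]
            norm_num [PySem.List.pyGet?, PySem.List.pyIdx?]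
            try decide
          case false =>
            cases h6 : PySem.Str.isIn "word" (PySem.Str.lower q)
            case true =>
              simp only [List.any, List.find?, h1, h2, h3, h4, h5, h6]
              norm_num [PySem.List.pyGet?, PySem.List.pyIdx?]
              try decide
            case false =>
              cases h7 : PySem.Str.isIn "meaning" (PySem.Str.lower q)
              case true =>
                simp only [List.any, List.find?, h1, h2, h3, h4, h5, h6, h7]
                norm_num [PySem.List.pyGet?, PySem.List.pyIdx?]
                try decide
              case false =>
                cases h8 : PySem.Str.isIn "synonym" (PySem.Str.lower q)
                case true =>
                  simp only [List.any, List.find?, h1, h2, h3, h4, h5, h6, h7, h8]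
                  norm_num [PySem.List.pyGet?, PySem.List.pyIdx?]
                  try decide
                case false =>
                  cases h9 : PySem.Str.isIn "conversation" (PySem.Str.lower q)
                  case true =>
                    simp only [List.any, List.find?, h1, h2, h3, h4, h5, h6, h7, h8, h9]
                    norm_num [PySem.List.pyGet?, PySem.List.pyIdx?]
                    try decide
                  case false =>
                    cases h10 : PySem.Str.isIn "dialogue" (PySem.Str.lower q)
                    case true =>
                      simp only [List.any, List.find?, h1, h2, h3, h4, h5, h6, h7, h8, h9, h10]
                      norm_num [PySem.List.pyGet?, PySem.List.pyIdx?]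
                      try decide
                    case false =>
                      cases h11 : PySem.Str.isIn "talk" (PySem.Str.lower q)
                      case true =>
                        simp only [List.any, List.find?, h1, h2, h3, h4, h5, h6, h7, h8, h9, h10, h11]
                        norm_num [PySem.List.pyGet?, PySem.List.pyIdx?]
                        try decide
                      case false =>
                        cases h12 : PySem.Str.isIn "grammar" (PySem.Str.lower q)
                        case true =>
                          simp only [List.any, List.find?, h1, h2, h3, h4, h5, h6, h7, h8, h9, h10, h11, h12]
                          norm_num [PySem.List.pyGet?, PySem.List.pyIdx?]
                          try decide
                        case false =>
                          cases h13 : PySem.Str.isIn "verb" (PySem.Str.lower q)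
                          case true =>
                            simp only [List.any, List.find?, h1, h2, h3, h4, h5, h6, h7, h8, h9, h10, h11, h12, h13]
                            norm_num [PySem.List.pyGet?, PySem.List.pyIdx?]
                            try decide
                          case false =>
                            cases h14 : PySem.Str.isIn "tense" (PySem.Str.lower q)
                            case true =>
                              simp only [List.any, List.find?, h1, h2, h3, h4, h5, h6, h7, h8, h9, h10, h11, h12, h13, h14]
                              norm_num [PySem.List.pyGet?, PySem.List.pyIdx?]
                              try decide
                            case false =>
                              cases h15 : PySem.Str.isIn "sentence" (PySem.Str.lower q)
                              case true =>
                                simp only [List.any, List.find?, h1, h2, h3, h4, h5, h6, h7, h8, h9, h10, h11, h12, h13, h14, h15]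
                                norm_num [PySem.List.pyGet?, PySem.List.pyIdx?]
                                try decide
                              case false =>
                                cases h16 : PySem.Str.isIn "write" (PySem.Str.lower q)
                                case true =>
                                  simp only [List.any, List.find?, h1, h2, h3, h4, h5, h6, h7, h8, h9, h10, h11, h12, h13, h14, h15, h16]
                                  norm_num [PySem.List.pyGet?, PySem.List.pyIdx?]
                                  try decide
                                case false =>
                                  cases h17 : PySem.Str.isIn "writing" (PySem.Str.lower q)
                                  case true =>
                                    simp only [List.any, List.find?, h1, h2, h3, h4, h5, h6, h7, h8, h9, h10, h11, h12, h13, h14, h15, h16, h17]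
                                    norm_num [PySem.List.pyGet?, PySem.List.pyIdx?]
                                    try decide
                                  case false =>
                                    simp only [List.any, List.find?, h1, h2, h3, h4, h5, h6, h7, h8, h9, h10, h11, h12, h13, h14, h15, h16, h17]
                                    decide
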